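-- pv_equiv track=rewrite | github.com/nawalerajat20/MapUP-DA-Assessment-2024 | submissions/python_section_1.py | group_by_length
-- ===== SOURCE A (Python) =====
-- from typing import Dict, List
--
-- def group_by_length(lst: List[str]) -> Dict[int, List[str]]:
--     """
--     Groups the strings by their length and returns a dictionary.
--     """
--     result = {}
--
--     for string in lst:
--         length = len(string)
--         if length not in result:
--             result[length] = []
--         result[length].append(string)
--
--     return dict(sorted(result.items()))
-- ===== SOURCE B (Python) =====
-- from typing import Dict, List
--
-- def group_by_length(lst: List[str]) -> Dict[int, List[str]]:
--     """
--     Sort the strings by length once (stable, so same-length strings keep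
--     their original order), then emit each maximal run of equal lengths in a
--     single pass; keys are created in ascending order, so no final key sort.
--     """
--     ordered = sorted(lst, key=len)
--     result = {}
--     i, n = 0, len(ordered)
--     while i < n:
--         k = len(ordered[i])
--         j = i
--         while j < n and len(ordered[j]) == k:
--             j += 1
--         result[k] = ordered[i:j]
--         i = j
--     return result
-- ===== Notes on version B (the rewrite author's own statement) =====
-- stated objective: alternative
-- what changed: Replaces A's grouping-dict-then-sort-keys strategy with a stable sort by length followed by a single run-scanning pass that emits each group of consecutive equal lengths, so no dict membership tests and no final key sort are needed.
import Mathlib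
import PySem

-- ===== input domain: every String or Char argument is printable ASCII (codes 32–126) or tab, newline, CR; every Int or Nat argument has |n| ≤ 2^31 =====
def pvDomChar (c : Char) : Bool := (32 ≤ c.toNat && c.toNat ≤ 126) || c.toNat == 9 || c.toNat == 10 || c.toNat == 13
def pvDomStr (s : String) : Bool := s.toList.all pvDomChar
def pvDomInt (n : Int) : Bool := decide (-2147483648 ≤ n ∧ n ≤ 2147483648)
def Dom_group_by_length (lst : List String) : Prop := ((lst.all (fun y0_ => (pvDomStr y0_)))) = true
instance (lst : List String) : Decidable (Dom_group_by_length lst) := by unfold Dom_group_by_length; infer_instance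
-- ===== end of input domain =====

-- B replaces A's grouping-dict-then-sort-keys strategy by a stable sort by length
-- followed by one run-scanning pass over consecutive equal lengths (alternative decomposition).


-- ===== PORT A =====
-- loop body of A: if length not in result: result[length] = []; result[length].append(string)
def pvStepA (d : PySem.Dict Int (List String)) (s : String) : PySem.Dict Int (List String) :=
  let length : Int := PySem.Str.len s
  let d' := if d.contains length then d else d.insert length ([] : List String)
  d'.modify length [] (fun g => g ++ [s])

-- sorted(result.items()) compares (key, value) tuples, but the dict's keys are
-- distinct, so sorting by the key alone is exact (the second component is never compared)
def group_by_length (lst : List String) : List (Int × List String) :=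
  let result := lst.foldl pvStepA (PySem.Dict.empty : PySem.Dict Int (List String))
  PySem.List.sorted result.items (fun p => p.1)

-- ===== PORT B =====
-- the outer while-loop of Source B: each step emits the run ordered[i:j] of equal lengths
-- (s :: takeWhile …) and continues at i = j (dropWhile …)
def pvGroupRuns (l : List String) : List (Int × List String) :=
  match l with
  | [] => []
  | s :: rest =>
    let k : Int := PySem.Str.len s
    (k, s :: rest.takeWhile (fun t => PySem.Str.len t == k)) ::
      pvGroupRuns (rest.dropWhile (fun t => PySem.Str.len t == k))
termination_by l.length
decreasing_by
  simp only [List.length_cons]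
  exact Nat.lt_succ_of_le (List.length_dropWhile_le _ _)

def group_by_length_alt (lst : List String) : List (Int × List String) :=
  pvGroupRuns (PySem.List.sorted lst (fun s => PySem.Str.len s))

-- ===== PRECONDITION & SPEC =====
def Spec_group_by_length (lst : List String) (out : List (Int × List String)) : Prop := out = group_by_length_alt lst
instance (lst : List String) (out : List (Int × List String)) : Decidable (Spec_group_by_length lst out) := by unfold Spec_group_by_length; infer_instance

-- ===== CLAIM (what is proved, stated in full; the proofs are below) =====
def Claim_equal_group_by_length : Prop := ∀ (lst : List String), Dom_group_by_length lst → Spec_group_by_length lst (group_by_length lst)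

-- ===== LEMMAS AND PROOFS =====

-- the canonical value both programs compute: ascending distinct lengths, each paired
-- with the strings of that length in original order
def pvCanon (lst : List String) : List (Int × List String) :=
  (PySem.List.sorted (PySem.Set.ofList (lst.map PySem.Str.len)) (fun x => x)).map
    (fun k => (k, lst.filter (fun s => PySem.Str.len s == k)))

theorem pvStepA_eq (d : PySem.Dict Int (List String)) (s : String) :
    pvStepA d s = d.insert (PySem.Str.len s) (d.getD (PySem.Str.len s) [] ++ [s]) := by
  unfold pvStepA
  simp only [PySem.Dict.modify]
  by_cases h : d.contains (PySem.Str.len s) = true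
  · rw [if_pos h]
  · rw [if_neg h, PySem.Dict.getD_insert_self, PySem.Dict.insert_insert_self,
      PySem.Dict.getD_of_not_contains d [] (Bool.not_eq_true _ ▸ h)]

theorem pvFoldA_getD (l : List String) (d : PySem.Dict Int (List String)) (k : Int) :
    (l.foldl pvStepA d).getD k [] = d.getD k [] ++ l.filter (fun s => PySem.Str.len s == k) := by
  induction l generalizing d with
  | nil => simp
  | cons s t ih =>
    simp only [List.foldl_cons, List.filter_cons, ih, pvStepA_eq, PySem.Dict.getD_insert]
    by_cases h : ((s.length : Int) = k)
    · simp [h]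
    · have h2 : ¬ (k = (s.length : Int)) := fun hh => h hh.symm
      simp [h, h2]

theorem pvFoldA_keys (l : List String) (d : PySem.Dict Int (List String)) :
    (l.foldl pvStepA d).keys = PySem.Set.update d.keys (l.map PySem.Str.len) := by
  have : ∀ d, l.foldl pvStepA d = l.foldl (fun d s => d.insert (PySem.Str.len s) (d.getD (PySem.Str.len s) [] ++ [s])) d := by
    intro d
    have hf : pvStepA = fun d s => d.insert (PySem.Str.len s) (d.getD (PySem.Str.len s) [] ++ [s]) := by
      funext d s; exact pvStepA_eq d s
    rw [hf]
  rw [this, PySem.Dict.keys_foldl_insert_key]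

theorem pvFoldA_nodup (l : List String) :
    ((l.foldl pvStepA (PySem.Dict.empty : PySem.Dict Int (List String))).keys).Nodup := by
  rw [pvFoldA_keys]
  simp [PySem.Set.update_nil_left]

theorem pvA_eq_canon (lst : List String) : group_by_length lst = pvCanon lst := by
  show PySem.List.sorted (lst.foldl pvStepA (PySem.Dict.empty : PySem.Dict Int (List String))).items (fun p => p.1) = pvCanon lst
  unfold pvCanon
  have hitems : (lst.foldl pvStepA (PySem.Dict.empty : PySem.Dict Int (List String))).items
      = (PySem.Set.ofList (lst.map PySem.Str.len)).map
          (fun k => (k, lst.filter (fun s => PySem.Str.len s == k))) := by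
    rw [PySem.Dict.items_eq_map_keys _ (pvFoldA_nodup lst) []]
    rw [pvFoldA_keys]
    have hkeys : PySem.Set.update (PySem.Dict.empty : PySem.Dict Int (List String)).keys (lst.map PySem.Str.len)
        = PySem.Set.ofList (lst.map PySem.Str.len) := by
      have : (PySem.Dict.empty : PySem.Dict Int (List String)).keys = [] := rfl
      rw [this, PySem.Set.update_nil_left]
    rw [hkeys]
    refine List.map_congr_left ?_
    intro k _
    rw [pvFoldA_getD]
    simp
  rw [hitems]
  refine PySem.List.sorted_eq_of_perm_of_pairwise_lt _ _ _ ?_ ?_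
  · exact List.Perm.map _ (PySem.List.sorted_perm _ _ false)
  · rw [List.pairwise_map]
    exact PySem.List.sorted_ofList_pairwise_lt _

-- first occurrences of a weakly increasing list are strictly increasing
theorem pvOfList_pairwise_lt (l : List Int) (h : l.Pairwise (· ≤ ·)) :
    (PySem.Set.ofList l).Pairwise (· < ·) := by
  induction l with
  | nil => simp [PySem.Set.ofList]
  | cons x xs ih =>
    rw [PySem.Set.ofList_cons]
    rcases List.pairwise_cons.mp h with ⟨hx, ht⟩
    refine List.pairwise_cons.mpr ⟨?_, ?_⟩
    · intro y hy
      rcases (PySem.Set.mem_discard _ _ _).mp hy with ⟨hy1, hy2⟩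
      exact lt_of_le_of_ne (hx y ((PySem.Set.mem_ofList _ _).mp hy1)) (Ne.symm hy2)
    · exact List.Pairwise.filter _ (ih ht)

-- distinct lengths of the sorted list, in order = the sorted distinct lengths
theorem pvKeys_sorted_eq (lst : List String) :
    PySem.Set.ofList ((PySem.List.sorted lst (fun s => PySem.Str.len s)).map PySem.Str.len)
      = PySem.List.sorted (PySem.Set.ofList (lst.map PySem.Str.len)) (fun x => x) := by
  refine Eq.symm (PySem.List.sorted_eq_of_perm_of_pairwise_lt (PySem.Set.ofList (lst.map PySem.Str.len)) _ (fun x : Int => x) ?_ ?_)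
  · rw [List.perm_ext_iff_of_nodup (PySem.Set.nodup_ofList _) (PySem.Set.nodup_ofList _)]
    intro a
    simp only [PySem.Set.mem_ofList, List.mem_map, PySem.List.mem_sorted]
  · exact pvOfList_pairwise_lt _ (PySem.List.sorted_map_key_pairwise lst PySem.Str.len)

-- stability: inserting x into a sorted list appends x to its own length-fibre
theorem pvFilter_insertBy (k : Int) (x : String) (ys : List String)
    (h : ys.Pairwise (fun a b => PySem.Str.len a ≤ PySem.Str.len b)) :
    (PySem.List.insertBy (fun a b => decide (PySem.Str.len a < PySem.Str.len b)) x ys).filter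
        (fun y => PySem.Str.len y == k)
      = ys.filter (fun y => PySem.Str.len y == k) ++ if PySem.Str.len x == k then [x] else [] := by
  induction ys with
  | nil => simp [PySem.List.insertBy]; split <;> simp_all
  | cons y ys ih =>
    rcases List.pairwise_cons.mp h with ⟨hy, ht⟩
    by_cases hb : PySem.Str.len x < PySem.Str.len y
    · have hins : PySem.List.insertBy (fun a b => decide (PySem.Str.len a < PySem.Str.len b)) x (y :: ys)
          = x :: y :: ys := by
        simp only [PySem.List.insertBy]
        rw [if_pos (by simpa using hb)]
      rw [hins]
      by_cases hk : PySem.Str.len x == k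
      · -- every element of y :: ys has length > k, so its filter is empty
        have hkx : PySem.Str.len x = k := by simpa using hk
        have hemp : (y :: ys).filter (fun y => PySem.Str.len y == k) = [] := by
          rw [List.filter_eq_nil_iff]
          intro a ha
          have : PySem.Str.len y ≤ PySem.Str.len a := by
            rcases List.mem_cons.mp ha with h1 | h2
            · simp [h1]
            · exact hy a h2
          have h3 : k < PySem.Str.len a := lt_of_lt_of_le (hkx ▸ hb) this
          simp at h3
          simp
          omega
        have hxx : (x :: y :: ys) = [x] ++ (y :: ys) := rfl
        rw [hxx, List.filter_append, hemp]
        simp [List.filter_cons]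
      · have hk' : ¬((x.length : Int) = k) := by simpa using hk
        simp [List.filter_cons, hk']
    · have hins : PySem.List.insertBy (fun a b => decide (PySem.Str.len a < PySem.Str.len b)) x (y :: ys)
          = y :: PySem.List.insertBy (fun a b => decide (PySem.Str.len a < PySem.Str.len b)) x ys := by
        simp only [PySem.List.insertBy]
        rw [if_neg (by simpa using hb)]
      rw [hins, List.filter_cons, List.filter_cons, ih ht]
      split <;> simp

-- a stable sort keeps each fibre of the key in the original order
theorem pvFilter_sorted (k : Int) (lst : List String) :
    (PySem.List.sorted lst (fun s => PySem.Str.len s)).filter (fun s => PySem.Str.len s == k)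
      = lst.filter (fun s => PySem.Str.len s == k) := by
  induction lst using List.reverseRecOn with
  | nil => simp [PySem.List.sorted]
  | append_singleton xs x ih =>
    have hs : PySem.List.sorted (xs ++ [x]) (fun s => PySem.Str.len s)
        = PySem.List.insertBy (fun a b => decide (PySem.Str.len a < PySem.Str.len b)) x
            (PySem.List.sorted xs (fun s => PySem.Str.len s)) := by
      rw [PySem.List.sorted_eq_foldl_insertBy, PySem.List.sorted_eq_foldl_insertBy, List.foldl_append]
      simp
    rw [hs, pvFilter_insertBy k x _ (PySem.List.sorted_pairwise xs _), ih, List.filter_append]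
    simp [List.filter_cons]

theorem pvDiscard_of_not_mem {s : List Int} {k : Int} (h : k ∉ s) :
    PySem.Set.discard s k = s := by
  simp only [PySem.Set.discard]
  refine List.filter_eq_self.mpr ?_
  intro x hx
  have hne : ¬ (x = k) := fun he => h (he ▸ hx)
  simpa using hne

-- set(k :: a ++ b) = k :: set(b) when a is all k and b avoids k
theorem pvOfList_runs (a b : List Int) (k : Int)
    (ha : ∀ x ∈ a, x = k) (hb : ∀ x ∈ b, x ≠ k) :
    PySem.Set.ofList (k :: (a ++ b)) = k :: PySem.Set.ofList b := by
  have hkb : k ∉ PySem.Set.ofList b := by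
    intro hk
    exact hb k ((PySem.Set.mem_ofList _ _).mp hk) rfl
  induction a with
  | nil =>
    rw [List.nil_append, PySem.Set.ofList_cons, pvDiscard_of_not_mem hkb]
  | cons a0 at' ih =>
    have ha0 : a0 = k := ha a0 (List.mem_cons_self)
    have ih' := ih (fun x hx => ha x (List.mem_cons_of_mem _ hx))
    rw [PySem.Set.ofList_cons, List.cons_append, ha0, ih']
    have : PySem.Set.discard (k :: PySem.Set.ofList b) k = PySem.Set.ofList b := by
      have : PySem.Set.discard (k :: PySem.Set.ofList b) k = PySem.Set.discard (PySem.Set.ofList b) k := by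
        simp [PySem.Set.discard]
      rw [this, pvDiscard_of_not_mem hkb]
    rw [this]

theorem pvGroupRuns_eq (l : List String)
    (h : l.Pairwise (fun a b => PySem.Str.len a ≤ PySem.Str.len b)) :
    pvGroupRuns l = (PySem.Set.ofList (l.map PySem.Str.len)).map
      (fun k => (k, l.filter (fun s => PySem.Str.len s == k))) := by
  induction l using pvGroupRuns.induct with
  | case1 => simp [pvGroupRuns, PySem.Set.ofList]
  | case2 s rest k ih =>
    have hk : k = PySem.Str.len s := rfl
    set q : String → Bool := fun t => PySem.Str.len t == k with hq
    set run := rest.takeWhile q with hrundef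
    set rest' := rest.dropWhile q with hrestdef
    have hsplit : run ++ rest' = rest := List.takeWhile_append_dropWhile
    have hhead : ∀ t ∈ rest, k ≤ PySem.Str.len t := by
      intro t ht
      exact (List.pairwise_cons.mp h).1 t ht
    have hrun : ∀ t ∈ run, PySem.Str.len t = k := by
      intro t ht
      have := List.mem_takeWhile_imp ht
      simpa [hq] using this
    have hPr : rest'.Pairwise (fun a b => PySem.Str.len a ≤ PySem.Str.len b) :=
      ((List.pairwise_cons.mp h).2).sublist (List.dropWhile_sublist _)
    have hgt : ∀ t ∈ rest', k < PySem.Str.len t := by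
      have key : ∀ r : List String, r.Pairwise (fun a b => PySem.Str.len a ≤ PySem.Str.len b) →
          (∀ t ∈ r, k ≤ PySem.Str.len t) → ∀ t ∈ r.dropWhile q, k < PySem.Str.len t := by
        intro r
        induction r with
        | nil => simp
        | cons a r ihr =>
          intro hp hge t ht
          by_cases hqa : q a = true
          · rw [List.dropWhile_cons_of_pos hqa] at ht
            exact ihr hp.of_cons (fun u hu => hge u (List.mem_cons_of_mem _ hu)) t ht
          · rw [List.dropWhile_cons_of_neg hqa] at ht
            have hka : k < PySem.Str.len a :=
              lt_of_le_of_ne (hge a List.mem_cons_self) (Ne.symm (by simpa [hq] using hqa))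
            rcases List.mem_cons.mp ht with rfl | htl
            · exact hka
            · exact lt_of_lt_of_le hka ((List.pairwise_cons.mp hp).1 t htl)
      rw [hrestdef]
      exact key rest h.of_cons hhead
    have hmap : (s :: rest).map PySem.Str.len = k :: (run.map PySem.Str.len ++ rest'.map PySem.Str.len) := by
      rw [← hsplit]; simp [hk]
    have hof : PySem.Set.ofList ((s :: rest).map PySem.Str.len)
        = k :: PySem.Set.ofList (rest'.map PySem.Str.len) := by
      rw [hmap]
      exact pvOfList_runs _ _ k
        (by intro x hx; rcases List.mem_map.mp hx with ⟨t, ht, rfl⟩; exact hrun t ht)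
        (by intro x hx; rcases List.mem_map.mp hx with ⟨t, ht, rfl⟩; exact Ne.symm (ne_of_lt (hgt t ht)))
    have hfilk : (s :: rest).filter (fun t => PySem.Str.len t == k) = s :: run := by
      rw [← hsplit, List.filter_cons, List.filter_append]
      have h1 : run.filter (fun t => PySem.Str.len t == k) = run :=
        List.filter_eq_self.mpr (fun t ht => by simpa using hrun t ht)
      have h2 : rest'.filter (fun t => PySem.Str.len t == k) = [] :=
        List.filter_eq_nil_iff.mpr (fun t ht => by simpa using Ne.symm (ne_of_lt (hgt t ht)))
      rw [h1, h2]
      simp [hk]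
    have hfilk' : ∀ k' : Int, k' ≠ k →
        (s :: rest).filter (fun t => PySem.Str.len t == k') = rest'.filter (fun t => PySem.Str.len t == k') := by
      intro k' hk'
      rw [← hsplit, List.filter_cons, List.filter_append]
      have h1 : run.filter (fun t => PySem.Str.len t == k') = [] := by
        refine List.filter_eq_nil_iff.mpr ?_
        intro t ht
        simp only [beq_iff_eq]
        rw [hrun t ht]
        exact Ne.symm hk'
      rw [h1, if_neg (by simp only [beq_iff_eq]; rw [← hk]; exact Ne.symm hk')]
      simp
    rw [pvGroupRuns]

    rw [ih hPr, hof, List.map_cons, hfilk]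
    congr 1
    refine List.map_congr_left ?_
    intro k' hk'
    have : k < k' := by
      rcases List.mem_map.mp ((PySem.Set.mem_ofList _ _).mp hk') with ⟨t, ht, rfl⟩
      exact hgt t ht
    rw [hfilk' k' (Ne.symm (ne_of_lt this))]

theorem pvB_eq_canon (lst : List String) : group_by_length_alt lst = pvCanon lst := by
  unfold group_by_length_alt pvCanon
  rw [pvGroupRuns_eq _ (PySem.List.sorted_pairwise lst _), pvKeys_sorted_eq]
  refine List.map_congr_left ?_
  intro k _
  rw [pvFilter_sorted]

-- ===== VERDICT (by name: the statement is the Claim_ definition above) =====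
theorem group_by_length_spec : Claim_equal_group_by_length := by
  intro lst _
  unfold Spec_group_by_length
  rw [pvA_eq_canon, pvB_eq_canon]
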